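-- pv_equiv track=rewrite | github.com/hues-platform/cesar-p-core | src/cesarp/common/profiles/profile_generation.py | combine_day_and_nighttime_profiles
-- ===== SOURCE A (Python) =====
-- from typing import List, Sequence
--
-- def combine_day_and_nighttime_profiles(daytime_year_profile_hourly, nighttime_year_profile_hourly, nighttime_pattern_year_profile_hourly: Sequence[bool]):
--     """
--     Combine a profile defining values during day with one defining values during nighttime with given wakeup and bedtime hours per day
--
--     :param daytime_year_profile_hourly: profile for one year with hourly values
--                                         profile values during nighttime are not used (they will be overwritten), but profile has to have every hour of the year defined
--     :param nighttime_year_profile_hourly: profile for one year with hourly values which should replace the original ones during nighttime (between bedtime and wakeup)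
--                                           profile values during daytime are not used (they are left on the original values from year_profile_hourly), but profile has to have every hour of the year defined
--     :param nighttime_pattern_year_profile_hourly: profile for one year with hourly entries, True if it is night, False otherwise
--     :return: year profile with hourly values, the values from year_profile_hourly during day and values from nighttime_year_profile_hourly during night
--
--     """
--     daytime_prof_length = len(daytime_year_profile_hourly)
--     assert len(nighttime_year_profile_hourly) == daytime_prof_length and len(nighttime_pattern_year_profile_hourly) == daytime_prof_length, (
--         f"daytime ({len(daytime_year_profile_hourly)}), "
--         f"nighttime ({len(nighttime_year_profile_hourly)}) and "
--         f"nighttime pattern ({len(nighttime_pattern_year_profile_hourly)}) profiles must have same length"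
--     )
--
--     corrected_profile = [
--         night_val if is_night else day_val
--         for day_val, night_val, is_night in zip(daytime_year_profile_hourly, nighttime_year_profile_hourly, nighttime_pattern_year_profile_hourly)
--     ]
--
--     return corrected_profile
-- ===== SOURCE B (Python) =====
-- def combine_day_and_nighttime_profiles(daytime_year_profile_hourly, nighttime_year_profile_hourly, nighttime_pattern_year_profile_hourly):
--     daytime_prof_length = len(daytime_year_profile_hourly)
--     assert len(nighttime_year_profile_hourly) == daytime_prof_length and len(nighttime_pattern_year_profile_hourly) == daytime_prof_length, (
--         f"daytime ({len(daytime_year_profile_hourly)}), "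
--         f"nighttime ({len(nighttime_year_profile_hourly)}) and "
--         f"nighttime pattern ({len(nighttime_pattern_year_profile_hourly)}) profiles must have same length"
--     )
--     # branch-free arithmetic masking: zero out night hours of the day profile,
--     # zero out day hours of the night profile, then sum the two masked profiles
--     day_part = [day_val * (1 - int(is_night))
--                 for day_val, is_night in zip(daytime_year_profile_hourly, nighttime_pattern_year_profile_hourly)]
--     night_part = [night_val * int(is_night)
--                   for night_val, is_night in zip(nighttime_year_profile_hourly, nighttime_pattern_year_profile_hourly)]
--     return [d + n for d, n in zip(day_part, night_part)]
-- ===== Notes on version B (the rewrite author's own statement) =====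
-- stated objective: alternative
-- what changed: Replaces the per-element ternary select with branch-free arithmetic masking in three staged passes: multiply the day profile by the complemented 0/1 mask, multiply the night profile by the mask, and sum the two masked profiles.
import Mathlib
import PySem

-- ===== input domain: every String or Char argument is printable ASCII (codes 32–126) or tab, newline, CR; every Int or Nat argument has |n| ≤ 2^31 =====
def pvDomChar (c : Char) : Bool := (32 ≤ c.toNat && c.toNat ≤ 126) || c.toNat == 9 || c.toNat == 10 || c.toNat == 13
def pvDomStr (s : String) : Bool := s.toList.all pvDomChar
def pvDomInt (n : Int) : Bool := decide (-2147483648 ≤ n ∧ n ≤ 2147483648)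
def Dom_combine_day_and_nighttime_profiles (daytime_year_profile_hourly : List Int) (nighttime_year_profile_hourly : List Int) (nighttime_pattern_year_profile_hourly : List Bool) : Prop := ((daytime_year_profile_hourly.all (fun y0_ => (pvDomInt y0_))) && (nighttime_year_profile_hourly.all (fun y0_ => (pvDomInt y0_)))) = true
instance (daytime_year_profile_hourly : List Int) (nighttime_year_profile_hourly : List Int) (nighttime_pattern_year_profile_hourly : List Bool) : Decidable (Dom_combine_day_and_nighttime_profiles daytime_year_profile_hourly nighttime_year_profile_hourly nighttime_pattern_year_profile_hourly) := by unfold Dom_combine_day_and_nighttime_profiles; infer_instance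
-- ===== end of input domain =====

-- B replaces the per-element ternary select with branch-free arithmetic masking in three staged passes (alternative decomposition, same cost).
-- ===== PORT A =====
-- the zip comprehension: per element, night value if is_night else day value (zip truncates at the shortest list)
def combine_day_and_nighttime_profiles (daytime_year_profile_hourly : List Int) (nighttime_year_profile_hourly : List Int) (nighttime_pattern_year_profile_hourly : List Bool) : List Int :=
  match daytime_year_profile_hourly, nighttime_year_profile_hourly, nighttime_pattern_year_profile_hourly with
  | day_val :: ds, night_val :: ns, is_night :: bs =>
      (if is_night then night_val else day_val) :: combine_day_and_nighttime_profiles ds ns bs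
  | _, _, _ => []

-- ===== PORT B =====
-- int(is_night): Python bool→int
def pyBoolInt (b : Bool) : Int := if b then 1 else 0

-- B: day_part = day masked by complement, night_part = night masked by mask, result = elementwise sum
def combine_day_and_nighttime_profiles_alt (daytime_year_profile_hourly : List Int) (nighttime_year_profile_hourly : List Int) (nighttime_pattern_year_profile_hourly : List Bool) : List Int :=
  let day_part := (daytime_year_profile_hourly.zip nighttime_pattern_year_profile_hourly).map
    (fun p => p.1 * (1 - pyBoolInt p.2))
  let night_part := (nighttime_year_profile_hourly.zip nighttime_pattern_year_profile_hourly).map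
    (fun p => p.1 * pyBoolInt p.2)
  (day_part.zip night_part).map (fun p => p.1 + p.2)

-- ===== PRECONDITION & SPEC =====
-- Pre_: exactly the inputs where A's assert passes (otherwise A raises AssertionError): all three lists have the same length
def Pre_combine_day_and_nighttime_profiles (daytime_year_profile_hourly : List Int) (nighttime_year_profile_hourly : List Int) (nighttime_pattern_year_profile_hourly : List Bool) : Prop :=
  nighttime_year_profile_hourly.length = daytime_year_profile_hourly.length ∧
  nighttime_pattern_year_profile_hourly.length = daytime_year_profile_hourly.length
instance (daytime_year_profile_hourly : List Int) (nighttime_year_profile_hourly : List Int) (nighttime_pattern_year_profile_hourly : List Bool) : Decidable (Pre_combine_day_and_nighttime_profiles daytime_year_profile_hourly nighttime_year_profile_hourly nighttime_pattern_year_profile_hourly) := by unfold Pre_combine_day_and_nighttime_profiles; infer_instance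
def pvWitness_combine_day_and_nighttime_profiles : List Int × List Int × List Bool := ([1, 2, 3], [7, 8, 9], [true, false, true])

def Spec_combine_day_and_nighttime_profiles (daytime_year_profile_hourly : List Int) (nighttime_year_profile_hourly : List Int) (nighttime_pattern_year_profile_hourly : List Bool) (out : List Int) : Prop := out = combine_day_and_nighttime_profiles_alt daytime_year_profile_hourly nighttime_year_profile_hourly nighttime_pattern_year_profile_hourly
instance (daytime_year_profile_hourly : List Int) (nighttime_year_profile_hourly : List Int) (nighttime_pattern_year_profile_hourly : List Bool) (out : List Int) : Decidable (Spec_combine_day_and_nighttime_profiles daytime_year_profile_hourly nighttime_year_profile_hourly nighttime_pattern_year_profile_hourly out) := by unfold Spec_combine_day_and_nighttime_profiles; infer_instance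

-- ===== CLAIM (what is proved, stated in full; the proofs are below) =====
def Claim_equal_combine_day_and_nighttime_profiles : Prop := ∀ (daytime_year_profile_hourly : List Int) (nighttime_year_profile_hourly : List Int) (nighttime_pattern_year_profile_hourly : List Bool), Dom_combine_day_and_nighttime_profiles daytime_year_profile_hourly nighttime_year_profile_hourly nighttime_pattern_year_profile_hourly → Pre_combine_day_and_nighttime_profiles daytime_year_profile_hourly nighttime_year_profile_hourly nighttime_pattern_year_profile_hourly → Spec_combine_day_and_nighttime_profiles daytime_year_profile_hourly nighttime_year_profile_hourly nighttime_pattern_year_profile_hourly (combine_day_and_nighttime_profiles daytime_year_profile_hourly nighttime_year_profile_hourly nighttime_pattern_year_profile_hourly)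

-- ===== LEMMAS AND PROOFS =====

-- the select and the masked sum agree elementwise, so the two programs agree on any three lists
theorem select_eq_masked_sum :
    ∀ (d n : List Int) (m : List Bool),
      combine_day_and_nighttime_profiles d n m
        = combine_day_and_nighttime_profiles_alt d n m := by
  intro d
  induction d with
  | nil =>
    intro n m
    cases n <;> cases m <;> rfl
  | cons dh dt ih =>
    intro n m
    cases n with
    | nil => cases m <;> rfl
    | cons nh nt =>
      cases m with
      | nil => rfl
      | cons mh mt =>
        have htail := ih nt mt
        cases mh <;>
          simp [combine_day_and_nighttime_profiles, combine_day_and_nighttime_profiles_alt,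
            pyBoolInt] at htail ⊢ <;> exact htail

-- ===== VERDICT (by name: the statement is the Claim_ definition above) =====
theorem combine_day_and_nighttime_profiles_spec : Claim_equal_combine_day_and_nighttime_profiles := by
  intro d n m _ _
  exact select_eq_masked_sum d n m
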